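-- pv_equiv track=rewrite | github.com/aryanshah2109/DSA-Codes | Strings/Problems/groupAnagrams.py | calculate_char
-- ===== SOURCE A (Python) =====
-- def calculate_char(s):
--     char_set = {}
--     for i in range(len(s)):
--         if s[i] in char_set:
--             char_set[s[i]] += 1
--         else:
--             char_set[s[i]] = 1
--
--     char_set_str = ""
--
--     for key in sorted(char_set.keys()):
--         char_set_str += "{}-{}".format(key, char_set[key])
--
--     return char_set_str
-- ===== SOURCE B (Python) =====
-- def calculate_char(s):
--     t = sorted(s)
--     parts = []
--     i = 0
--     n = len(t)
--     while i < n: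
--         j = i + 1
--         while j < n and t[j] == t[i]:
--             j += 1
--         parts.append("{}-{}".format(t[i], j - i))
--         i = j
--     return "".join(parts)
-- ===== Notes on version B (the rewrite author's own statement) =====
-- stated objective: alternative
-- what changed: Replaces the dict-of-counts build followed by a sorted-keys pass with sorting the characters once and emitting one part per consecutive equal run, joined at the end.
import Mathlib
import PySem

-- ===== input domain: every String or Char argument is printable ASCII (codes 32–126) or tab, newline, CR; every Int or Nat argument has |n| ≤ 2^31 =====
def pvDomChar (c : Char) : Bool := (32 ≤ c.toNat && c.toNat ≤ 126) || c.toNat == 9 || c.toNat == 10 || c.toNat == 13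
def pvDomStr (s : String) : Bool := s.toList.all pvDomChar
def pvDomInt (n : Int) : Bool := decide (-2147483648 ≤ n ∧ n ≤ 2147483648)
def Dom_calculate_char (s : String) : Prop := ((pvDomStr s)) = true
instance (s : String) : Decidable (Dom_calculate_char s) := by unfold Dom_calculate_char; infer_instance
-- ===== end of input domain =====

-- B sorts the characters once and emits one "c-n" part per consecutive equal run (joined at the end),
-- instead of A's dict-of-counts build followed by a pass over its sorted keys; same cost, different algorithm.

-- ===== PORT A =====
def calculate_char (s : String) : String :=
  let char_set : PySem.Dict Char Int :=
    s.toList.foldl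
      (fun d c => if d.contains c then d.insert c (d.getD c 0 + 1) else d.insert c 1)
      PySem.Dict.empty
  (PySem.List.sorted char_set.keys (fun x => x) false).foldl
    (fun acc k => acc ++ (String.ofList [k] ++ "-" ++ PySem.Int.toStr (char_set.getD k 0))) ""

-- ===== PORT B =====
-- one part per run: the inner 'while t[j] == t[i]' is the takeWhile, the loop resumes at the dropWhile
def runsB (t : List Char) : List String :=
  match t with
  | [] => []
  | c :: r =>
    (String.ofList [c] ++ "-" ++ PySem.Int.toStr ((1 + (r.takeWhile (· == c)).length : Nat) : Int))
      :: runsB (r.dropWhile (· == c))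
termination_by t.length
decreasing_by simpa using Nat.lt_succ_of_le (List.length_dropWhile_le _ r)

def calculate_char_alt (s : String) : String :=
  String.join (runsB (PySem.List.sorted s.toList (fun x => x) false))

-- ===== PRECONDITION & SPEC =====
def Spec_calculate_char (s : String) (out : String) : Prop := out = calculate_char_alt s
instance (s : String) (out : String) : Decidable (Spec_calculate_char s out) := by unfold Spec_calculate_char; infer_instance

-- ===== CLAIM (what is proved, stated in full; the proofs are below) =====
def Claim_equal_calculate_char : Prop := ∀ (s : String), Dom_calculate_char s → Spec_calculate_char s (calculate_char s)

-- ===== LEMMAS AND PROOFS =====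

-- In a ≤-sorted list whose elements are all ≥ c, the run of c's is an initial segment:
-- takeWhile picks up exactly count-many c's, and everything after the run is > c.
lemma take_drop_count (c : Char) : ∀ (t : List Char), t.Pairwise (· ≤ ·) → (∀ x ∈ t, c ≤ x) →
    (t.takeWhile (· == c)).length = t.count c ∧ ∀ x ∈ t.dropWhile (· == c), c < x := by
  intro t
  induction t with
  | nil => simp
  | cons x r ih =>
    intro hp hge
    rcases List.pairwise_cons.mp hp with ⟨hx, hr⟩
    by_cases hxc : x = c
    · subst hxc
      have h := ih hr hx
      refine ⟨?_, ?_⟩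
      · simp [List.takeWhile, h.1]
      · simpa [List.dropWhile] using h.2
    · have hcx : c < x := lt_of_le_of_ne (hge x (List.mem_cons_self)) (fun h => hxc h.symm)
      have hnot : c ∉ x :: r := by
        intro hmem
        rcases List.mem_cons.mp hmem with h | h
        · exact hxc h.symm
        · exact absurd (lt_of_lt_of_le hcx (hx c h)) (lt_irrefl c)
      have hbeq : (x == c) = false := by simpa using hxc
      constructor
      · simp [List.takeWhile, hbeq, List.count_eq_zero.mpr hnot]
      · intro y hy
        rw [List.dropWhile_cons, hbeq] at hy
        simp at hy
        rcases hy with h | h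
        · exact h ▸ hcx
        · exact lt_of_lt_of_le hcx (hx y h)

lemma runsB_sorted : ∀ (t : List Char), t.Pairwise (· ≤ ·) →
    runsB t = (PySem.List.sorted (PySem.Set.ofList t) (fun x => x) false).map
      (fun k => String.ofList [k] ++ "-" ++ PySem.Int.toStr ((t.count k : Nat) : Int)) := by
  have main : ∀ (n : Nat) (t : List Char), t.length ≤ n → t.Pairwise (· ≤ ·) →
      runsB t = (PySem.List.sorted (PySem.Set.ofList t) (fun x => x) false).map
        (fun k => String.ofList [k] ++ "-" ++ PySem.Int.toStr ((t.count k : Nat) : Int)) := by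
    intro n
    induction n with
    | zero =>
      intro t ht _
      rw [List.length_eq_zero_iff.mp (Nat.le_zero.mp ht)]
      simp [runsB, PySem.List.sorted_eq_nil_iff]
    | succ n IH =>
      intro t hlen'
      match t with
      | [] => intro _; simp [runsB, PySem.List.sorted_eq_nil_iff]
      | c :: r =>
        intro hp
        rcases List.pairwise_cons.mp hp with ⟨hx, hr⟩
        obtain ⟨hlen, hgt⟩ := take_drop_count c r hr hx
        set r2 := r.dropWhile (· == c) with hr2
        have hsub : r2.Sublist r := List.dropWhile_sublist _
        have hp2 : r2.Pairwise (· ≤ ·) := hr.sublist hsub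
        have ih := IH r2 (by
          have := hsub.length_le
          have h2 := Nat.succ_le_succ this
          simpa using Nat.le_trans this (Nat.le_of_succ_le_succ hlen')) hp2
        have hc2 : ∀ a ∈ r2, c < a := hgt
        -- membership of c :: r vs {c} ∪ r2
        have hmem : ∀ a : Char, (a ∈ c :: r) ↔ (a = c ∨ a ∈ r2) := by
          intro a
          constructor
          · intro ha
            rcases List.mem_cons.mp ha with h | h
            · exact Or.inl h
            · by_cases hac : a = c
              · exact Or.inl hac
              · right
                rw [← List.takeWhile_append_dropWhile (p := (· == c)) (l := r)] at h
                rcases List.mem_append.mp h with h' | h'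
                · exact absurd (by simpa using List.mem_takeWhile_imp h') hac
                · exact h'
          · intro ha
            rcases ha with ha | ha
            · exact ha ▸ List.mem_cons_self
            · exact List.mem_cons_of_mem _ (hsub.mem ha)
        -- sorted distinct chars of c::r = c :: sorted distinct chars of r2
        have hns : (PySem.List.sorted (PySem.Set.ofList r2) (fun x => x) false).Perm (PySem.Set.ofList r2) :=
          PySem.List.sorted_perm _ _ _
        have hnodup2 : (PySem.List.sorted (PySem.Set.ofList r2) (fun x => x) false).Nodup :=
          hns.nodup_iff.mpr (PySem.Set.nodup_ofList r2)
        have hcnot : c ∉ PySem.List.sorted (PySem.Set.ofList r2) (fun x => x) false := by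
          intro h
          have : c ∈ r2 := by
            have := (PySem.List.mem_sorted _ _ _ _).mp h
            simpa [PySem.Set.mem_ofList] using this
          exact absurd (hc2 c this) (lt_irrefl c)
        have hkeys : PySem.List.sorted (PySem.Set.ofList (c :: r)) (fun x => x) false
            = c :: PySem.List.sorted (PySem.Set.ofList r2) (fun x => x) false := by
          apply PySem.List.sorted_eq_of_perm_of_pairwise_lt
          · rw [List.perm_ext_iff_of_nodup
              (List.Nodup.cons hcnot hnodup2) (PySem.Set.nodup_ofList _)]
            intro a
            simp only [List.mem_cons, PySem.Set.mem_ofList, PySem.List.mem_sorted]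
            rw [← hmem a]
            simp
          · apply List.pairwise_cons.mpr
            refine ⟨?_, ?_⟩
            · intro a ha
              exact hc2 a (by simpa [PySem.Set.mem_ofList] using (PySem.List.mem_sorted _ _ _ _).mp ha)
            · exact PySem.List.sorted_ofList_pairwise_lt r2
        -- unfold one step of runsB
        rw [runsB, hkeys, List.map_cons, ih]
        congr 1
        · -- head piece: count of c in c::r is 1 + the run length
          have : (c :: r).count c = 1 + (r.takeWhile (· == c)).length := by
            simp [hlen, Nat.add_comm]
          rw [this]
        · -- tail pieces: for k in r2's distinct chars, count in c::r = count in r2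
          apply List.map_congr_left
          intro k hk
          have hk2 : k ∈ r2 := by
            simpa [PySem.Set.mem_ofList] using (PySem.List.mem_sorted _ _ _ _).mp hk
          have hkc : k ≠ c := fun h => absurd (hc2 k hk2) (h ▸ lt_irrefl c)
          have hcount : (c :: r).count k = r2.count k := by
            have hr1 : (r.takeWhile (· == c)).count k = 0 := by
              apply List.count_eq_zero.mpr
              intro hmem
              exact hkc (by simpa using List.mem_takeWhile_imp hmem)
            calc (c :: r).count k = r.count k := by
                  simp [List.count_cons, (beq_eq_false_iff_ne.mpr (fun h => hkc h.symm))]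
              _ = (r.takeWhile (· == c)).count k + r2.count k := by
                  rw [← List.count_append, List.takeWhile_append_dropWhile]
              _ = r2.count k := by rw [hr1, Nat.zero_add]
          rw [hcount]

  intro t
  exact main t.length t (le_refl _)

-- A's counting loop is exactly the Counter build
lemma astep_eq : (fun (d : PySem.Dict Char Int) c =>
      if d.contains c then d.insert c (d.getD c 0 + 1) else d.insert c 1)
    = fun (d : PySem.Dict Char Int) c => d.insert c (d.getD c 0 + 1) := by
  funext d c
  by_cases h : d.contains c = true
  · simp [h]
  · have h' : d.contains c = false := by simpa using h
    rw [if_neg h, PySem.Dict.getD_of_not_contains d 0 h']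
    norm_num

-- ===== VERDICT (by name: the statement is the Claim_ definition above) =====
theorem calculate_char_spec : Claim_equal_calculate_char := by
  intro s _
  unfold Spec_calculate_char calculate_char calculate_char_alt
  set l := s.toList with hl
  set zs := PySem.List.sorted l (fun x => x) false with hzs
  have hzp : zs.Pairwise (· ≤ ·) := PySem.List.sorted_pairwise l (fun x => x)
  -- A side: the dict is the counter, its keys are the distinct chars, lookups are counts
  rw [astep_eq, PySem.Dict.foldl_insert_getD_add_one_eq_counter]
  simp only [PySem.Dict.keys_counter, PySem.Dict.getD_counter]
  -- B side: runs over the sorted list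
  rw [runsB_sorted zs hzp]
  have hperm : (PySem.Set.ofList zs).Perm (PySem.Set.ofList l) := by
    rw [List.perm_ext_iff_of_nodup (PySem.Set.nodup_ofList _) (PySem.Set.nodup_ofList _)]
    intro a
    simp [PySem.Set.mem_ofList, hzs, PySem.List.mem_sorted]
  have hsorteq : PySem.List.sorted (PySem.Set.ofList zs) (fun x => x) false
      = PySem.List.sorted (PySem.Set.ofList l) (fun x => x) false :=
    PySem.List.sorted_eq_sorted_of_perm _ _ _ (fun _ _ h => h) hperm
  have hcount : ∀ k : Char, zs.count k = l.count k :=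
    fun k => (PySem.List.sorted_perm l (fun x => x) false).count_eq k
  rw [hsorteq]
  rw [String.join, List.foldl_map]
  simp only [hcount]
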